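-- pv_equiv track=rewrite | github.com/aldy-san/megumin-bot | hummingCode.py | find_parity
-- ===== SOURCE A (Python) =====
-- def find_parity(data, p, coor):
--     stepper = 0
--     index = p
--     d_summer = ""
--     num_summer = ""
--     result_xor = 0
--     while (index < len(data) + 1):
--         d_summer += f"{coor[index-1]}"
--         num_summer += f"{data[index-1]}"
--         if (data[index - 1] != "_"):
--             result_xor ^= int(data[index - 1])
--         stepper += 1
--         if (stepper >= p):
--             index += p
--             stepper = 0
--         index += 1
--         if (index < len(data) + 1):
--             d_summer += " + "
--             num_summer += " + "
--     return d_summer, num_summer, result_xor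
-- ===== SOURCE B (Python) =====
-- def find_parity(data, p, coor):
--     n = len(data)
--     positions = [i for i in range(1, n + 1) if (i // p) % 2 == 1]
--     d_summer = " + ".join(str(coor[i - 1]) for i in positions)
--     num_summer = " + ".join(data[i - 1] for i in positions)
--     result_xor = 0
--     for i in positions:
--         if data[i - 1] != "_":
--             result_xor ^= int(data[i - 1])
--     return d_summer, num_summer, result_xor
-- ===== Notes on version B (the rewrite author's own statement) =====
-- stated objective: alternative
-- what changed: Replaces A's stateful stepper/index while-loop with conditional ' + ' appends by a closed-form characterization of the visited 1-based positions ((i // p) % 2 == 1), then builds each output in a separate pass: two joins and one xor fold over that position list.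
-- outside the precondition, e.g. on find_parity(['1', '2'], 0, [5, 6]): A returns ('6 + 5 + 6', '2 + 1 + 2', 1), B raises ZeroDivisionError
import Mathlib
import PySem

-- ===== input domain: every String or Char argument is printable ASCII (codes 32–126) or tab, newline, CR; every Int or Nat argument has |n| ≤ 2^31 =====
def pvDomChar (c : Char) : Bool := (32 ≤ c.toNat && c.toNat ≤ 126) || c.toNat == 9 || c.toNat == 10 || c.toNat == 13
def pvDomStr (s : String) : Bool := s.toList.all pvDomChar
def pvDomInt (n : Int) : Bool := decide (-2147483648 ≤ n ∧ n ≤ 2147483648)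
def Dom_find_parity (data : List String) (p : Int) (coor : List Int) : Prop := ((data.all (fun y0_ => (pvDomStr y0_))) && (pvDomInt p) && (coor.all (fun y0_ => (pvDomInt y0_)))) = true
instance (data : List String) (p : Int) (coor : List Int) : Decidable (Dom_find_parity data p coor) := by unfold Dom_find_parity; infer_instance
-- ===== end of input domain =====

-- B replaces A's stepper/index state machine by a closed-form visited-position list with separate
-- join/fold passes; same asymptotic cost (objective: alternative).


-- ===== PORT A =====
-- literal port of A's while-loop; fuel = data.length + 1 bounds the iteration count (on Pre_ inputs
-- the index strictly increases each iteration, so the fuel is never exhausted there).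
def fpLoopA (data : List String) (p : Int) (coor : List Int) :
    Nat → Int → Int → String → String → Int → String × String × Int
  | 0, _, _, d, n, x => (d, n, x)
  | fuel + 1, stepper, index, d, n, x =>
    if index < (data.length : Int) + 1 then
      let d := d ++ PySem.Int.toStr (PySem.List.pyGetD coor (index - 1) 0)
      let sv := PySem.List.pyGetD data (index - 1) ""
      let n := n ++ sv
      let x := if sv ≠ "_" then PySem.Int.bxor x ((PySem.Int.ofStr? sv).getD 0) else x
      let stepper := stepper + 1
      let si : Int × Int := if stepper ≥ p then (0, index + p) else (stepper, index)
      let index := si.2 + 1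
      let d := if index < (data.length : Int) + 1 then d ++ " + " else d
      let n := if index < (data.length : Int) + 1 then n ++ " + " else n
      fpLoopA data p coor fuel si.1 index d n x
    else (d, n, x)

def find_parity (data : List String) (p : Int) (coor : List Int) : String × String × Int :=
  fpLoopA data p coor (data.length + 1) 0 p "" "" 0

-- ===== PORT B =====
def find_parity_alt (data : List String) (p : Int) (coor : List Int) : String × String × Int :=
  let n : Int := data.length
  let positions := (PySem.List.pyRange 1 (n + 1) 1).filter
    (fun i => PySem.Int.mod (PySem.Int.floordiv i p) 2 == 1)
  let d_summer := PySem.Str.join " + "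
    (positions.map (fun i => PySem.Int.toStr (PySem.List.pyGetD coor (i - 1) 0)))
  let num_summer := PySem.Str.join " + "
    (positions.map (fun i => PySem.List.pyGetD data (i - 1) ""))
  let result_xor := positions.foldl
    (fun x i =>
      let sv := PySem.List.pyGetD data (i - 1) ""
      if sv ≠ "_" then PySem.Int.bxor x ((PySem.Int.ofStr? sv).getD 0) else x) 0
  (d_summer, num_summer, result_xor)

-- ===== PRECONDITION & SPEC =====
-- Pre_ restricts p to the natural domain p ≥ 1 (A's behaviour for p ≤ 0 rests on Python's
-- negative-index wraparound; B raises ZeroDivisionError there) and excludes inputs where A raises: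
-- a visited position past the end of coor (IndexError) or a visited non-"_" entry int() rejects (ValueError).
def Pre_find_parity (data : List String) (p : Int) (coor : List Int) : Prop :=
  1 ≤ p ∧ ∀ i ∈ PySem.List.pyRange 1 ((data.length : Int) + 1) 1,
    PySem.Int.mod (PySem.Int.floordiv i p) 2 = 1 →
      i ≤ (coor.length : Int) ∧
      (PySem.List.pyGetD data (i - 1) "" = "_" ∨
        (PySem.Int.ofStr? (PySem.List.pyGetD data (i - 1) "")).isSome = true)

instance (data : List String) (p : Int) (coor : List Int) : Decidable (Pre_find_parity data p coor) := by
  unfold Pre_find_parity; infer_instance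

def pvWitness_find_parity : List String × Int × List Int :=
  (["1", "_", "3", "4"], 2, [10, 20, 30, 40])

def Spec_find_parity (data : List String) (p : Int) (coor : List Int) (out : String × String × Int) : Prop := out = find_parity_alt data p coor
instance (data : List String) (p : Int) (coor : List Int) (out : String × String × Int) : Decidable (Spec_find_parity data p coor out) := by unfold Spec_find_parity; infer_instance

-- ===== CLAIM (what is proved, stated in full; the proofs are below) =====
def Claim_equal_find_parity : Prop := ∀ (data : List String) (p : Int) (coor : List Int), Dom_find_parity data p coor → Pre_find_parity data p coor → Spec_find_parity data p coor (find_parity data p coor)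

-- ===== LEMMAS AND PROOFS =====

-- proof-only helpers: the closed-form visited-position predicate and the remaining-position list
def fpPred (p i : Int) : Bool := PySem.Int.mod (PySem.Int.floordiv i p) 2 == 1
def fpRest (data : List String) (p i : Int) : List Int :=
  (PySem.List.pyRange i ((data.length : Int) + 1) 1).filter (fpPred p)
def fpItemD (coor : List Int) (i : Int) : String := PySem.Int.toStr (PySem.List.pyGetD coor (i - 1) 0)
def fpItemN (data : List String) (i : Int) : String := PySem.List.pyGetD data (i - 1) ""
def fpXStep (data : List String) (x i : Int) : Int :=
  let sv := PySem.List.pyGetD data (i - 1) ""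
  if sv ≠ "_" then PySem.Int.bxor x ((PySem.Int.ofStr? sv).getD 0) else x

theorem join_cons_cons (sep a b : String) (l : List String) :
    PySem.Str.join sep (a :: b :: l) = a ++ sep ++ PySem.Str.join sep (b :: l) := by
  simp only [PySem.Str.join, List.map_cons, PySem.Chars.join_cons_cons]
  rw [← String.toList_inj]
  simp

theorem join_nil (sep : String) : PySem.Str.join sep [] = "" := by
  simp [PySem.Str.join, PySem.Chars.join_nil]

theorem join_singleton (sep a : String) : PySem.Str.join sep [a] = a := by
  simp [PySem.Str.join, PySem.Chars.join_singleton]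

theorem fpPred_true (p : Int) (hp : 1 ≤ p) (k : Nat) (i : Int)
    (h1 : (2 * (k : Int) + 1) * p ≤ i) (h2 : i < (2 * (k : Int) + 2) * p) : fpPred p i = true := by
  have hq : PySem.Int.floordiv i p = 2 * (k : Int) + 1 := by
    rw [PySem.Int.floordiv_eq_iff_of_pos (by omega)]
    refine ⟨h1, ?_⟩
    have e : (2 * (k : Int) + 1 + 1) * p = (2 * (k : Int) + 2) * p := by ring
    rw [e]; exact h2
  simp only [fpPred, hq, PySem.Int.mod_eq_emod_of_pos (show (0:Int) < 2 by omega), beq_iff_eq]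
  omega

theorem fpPred_false (p : Int) (hp : 1 ≤ p) (q i : Int) (hq : q % 2 = 0)
    (h1 : q * p ≤ i) (h2 : i < (q + 1) * p) : fpPred p i = false := by
  have hfd : PySem.Int.floordiv i p = q := by
    rw [PySem.Int.floordiv_eq_iff_of_pos (by omega)]
    exact ⟨h1, h2⟩
  simp only [fpPred, hfd, PySem.Int.mod_eq_emod_of_pos (show (0:Int) < 2 by omega),
    beq_eq_false_iff_ne, ne_eq]
  omega

-- filtering a range whose skipped prefix fails the predicate
theorem filter_pyRange_skip (pred : Int → Bool) (b : Int) :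
    ∀ (g : Nat) (a a' : Int), a' - a ≤ (g : Int) → a ≤ a' →
    (∀ j, a ≤ j → j < a' → pred j = false) →
    (PySem.List.pyRange a b 1).filter pred = (PySem.List.pyRange a' b 1).filter pred := by
  intro g
  induction g with
  | zero =>
    intro a a' hg h _
    have : a = a' := by omega
    rw [this]
  | succ g ih =>
    intro a a' hg h hf
    by_cases he : a = a'
    · rw [he]
    · by_cases hb : b ≤ a
      · rw [PySem.List.pyRange_one_eq_nil hb, PySem.List.pyRange_one_eq_nil (by omega)]
      · rw [PySem.List.pyRange_one_cons (by omega)]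
        simp only [List.filter_cons, hf a (by omega) (by omega)]
        exact ih (a + 1) a' (by omega) (by omega) (fun j hj1 hj2 => hf j (by omega) hj2)

theorem fpRest_nil (data : List String) (p i : Int) (h : (data.length : Int) + 1 ≤ i) :
    fpRest data p i = [] := by
  unfold fpRest
  rw [PySem.List.pyRange_one_eq_nil h]
  rfl

theorem fpRest_cons (data : List String) (p i : Int) (h : i < (data.length : Int) + 1)
    (hpred : fpPred p i = true) : fpRest data p i = i :: fpRest data p (i + 1) := by
  unfold fpRest
  rw [PySem.List.pyRange_one_cons h]
  simp [hpred]

-- the loop invariant: at the head of A's while-loop, index = (2k+1)*p + stepper with 0 ≤ stepper < p,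
-- and the loop emits exactly the remaining visited positions, joined with " + "
theorem loopA_eq (data : List String) (coor : List Int) (p : Int) (hp : 1 ≤ p) :
    ∀ (fuel k : Nat) (s i : Int), 0 ≤ s → s < p → i = (2 * (k : Int) + 1) * p + s →
    (fpRest data p i).length ≤ fuel →
    ∀ d n x, fpLoopA data p coor fuel s i d n x =
      (d ++ PySem.Str.join " + " ((fpRest data p i).map (fpItemD coor)),
       n ++ PySem.Str.join " + " ((fpRest data p i).map (fpItemN data)),
       (fpRest data p i).foldl (fpXStep data) x) := by
  intro fuel
  induction fuel with
  | zero =>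
    intro k s i hs0 hsp hi hlen d n x
    have hrest : fpRest data p i = [] := List.eq_nil_of_length_eq_zero (by omega)
    simp [fpLoopA, hrest, join_nil]
  | succ fuel ih =>
    intro k s i hs0 hsp hi hlen d n x
    by_cases hlt : i < (data.length : Int) + 1
    · have hpredi : fpPred p i = true := by
        refine fpPred_true p hp k i (by omega) ?_
        have : (2 * (k : Int) + 2) * p = (2 * (k : Int) + 1) * p + p := by ring
        omega
      by_cases hstep : p ≤ s + 1
      · -- block finished: s = p - 1, jump to the next block
        have hs : s = p - 1 := by omega
        have hblk : i + 1 = (2 * (k : Int) + 2) * p := by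
          have : (2 * (k : Int) + 2) * p = (2 * (k : Int) + 1) * p + p := by ring
          omega
        have hnext : i + p + 1 = (2 * ((k : Int) + 1) + 1) * p + 0 := by
          have : (2 * ((k : Int) + 1) + 1) * p = (2 * (k : Int) + 2) * p + p := by ring
          omega
        have hskip : fpRest data p (i + 1) = fpRest data p (i + p + 1) := by
          refine filter_pyRange_skip (fpPred p) _ p.toNat (i + 1) (i + p + 1) (by omega) (by omega) ?_
          intro j hj1 hj2
          refine fpPred_false p hp (2 * (k : Int) + 2) j (by omega) (by omega) ?_
          have : (2 * (k : Int) + 2 + 1) * p = (2 * (k : Int) + 2) * p + p := by ring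
          omega
        have hrest : fpRest data p i = i :: fpRest data p (i + p + 1) := by
          rw [fpRest_cons data p i hlt hpredi, hskip]
        have hIH := ih (k + 1) 0 (i + p + 1) (by omega) (by omega)
          (by push_cast; omega) (by rw [hrest] at hlen; simp at hlen; omega)
        simp only [fpLoopA, if_pos hlt, ge_iff_le, if_pos hstep]
        rw [hrest]
        by_cases h2 : i + p + 1 < (data.length : Int) + 1
        · have hrest2 : fpRest data p (i + p + 1) =
              (i + p + 1) :: fpRest data p (i + p + 1 + 1) := by
            refine fpRest_cons data p _ h2 ?_
            refine fpPred_true p hp (k + 1) _ (by push_cast; omega) ?_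
            push_cast
            have : (2 * ((k : Int) + 1) + 2) * p = (2 * ((k : Int) + 1) + 1) * p + p := by ring
            omega
          rw [if_pos h2, if_pos h2, hIH, hrest2]
          simp only [List.map_cons, List.foldl_cons, join_cons_cons]
          refine Prod.ext ?_ (Prod.ext ?_ ?_) <;>
            simp [String.append_assoc, fpItemD, fpItemN, fpXStep]
        · have hrest2 : fpRest data p (i + p + 1) = [] := fpRest_nil data p _ (by omega)
          rw [if_neg h2, if_neg h2, hIH, hrest2]
          simp only [List.map_cons, List.map_nil, List.foldl_cons, List.foldl_nil, join_nil,
            join_singleton]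
          refine Prod.ext ?_ (Prod.ext ?_ ?_) <;>
            simp [fpItemD, fpItemN, fpXStep]
      · -- still inside the block: advance by one
        have hrest : fpRest data p i = i :: fpRest data p (i + 1) :=
          fpRest_cons data p i hlt hpredi
        have hIH := ih k (s + 1) (i + 1) (by omega) (by omega) (by omega)
          (by rw [hrest] at hlen; simp at hlen; omega)
        simp only [fpLoopA, if_pos hlt, ge_iff_le, if_neg hstep]
        rw [hrest]
        by_cases h2 : i + 1 < (data.length : Int) + 1
        · have hrest2 : fpRest data p (i + 1) = (i + 1) :: fpRest data p (i + 1 + 1) := by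
            refine fpRest_cons data p _ h2 ?_
            refine fpPred_true p hp k _ (by omega) ?_
            have : (2 * (k : Int) + 2) * p = (2 * (k : Int) + 1) * p + p := by ring
            omega
          rw [if_pos h2, if_pos h2, hIH, hrest2]
          simp only [List.map_cons, List.foldl_cons, join_cons_cons]
          refine Prod.ext ?_ (Prod.ext ?_ ?_) <;>
            simp [String.append_assoc, fpItemD, fpItemN, fpXStep]
        · have hrest2 : fpRest data p (i + 1) = [] := fpRest_nil data p _ (by omega)
          rw [if_neg h2, if_neg h2, hIH, hrest2]
          simp only [List.map_cons, List.map_nil, List.foldl_cons, List.foldl_nil, join_nil,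
            join_singleton]
          refine Prod.ext ?_ (Prod.ext ?_ ?_) <;>
            simp [fpItemD, fpItemN, fpXStep]
    · have hrest : fpRest data p i = [] := fpRest_nil data p i (by omega)
      simp only [fpLoopA, if_neg hlt, hrest, List.map_nil, List.foldl_nil, join_nil]
      simp

theorem positions_eq (data : List String) (p : Int) (hp : 1 ≤ p) :
    fpRest data p 1 = fpRest data p p := by
  refine filter_pyRange_skip (fpPred p) _ p.toNat 1 p (by omega) hp ?_
  intro j hj1 hj2
  refine fpPred_false p hp 0 j (by omega) (by omega) (by omega)

-- ===== VERDICT (by name: the statement is the Claim_ definition above) =====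
theorem find_parity_spec : Claim_equal_find_parity := by
  intro data p coor hdom hpre
  obtain ⟨hp, -⟩ := hpre
  unfold Spec_find_parity find_parity find_parity_alt
  have hfuel : (fpRest data p p).length ≤ data.length + 1 := by
    have h1 := List.length_filter_le (fpPred p)
      (PySem.List.pyRange p ((data.length : Int) + 1) 1)
    rw [PySem.List.length_pyRange_one] at h1
    unfold fpRest
    omega
  rw [loopA_eq data coor p hp (data.length + 1) 0 0 p (by omega) (by omega) (by push_cast; ring)
    hfuel "" "" 0]
  have hpos : (PySem.List.pyRange 1 ((data.length : Int) + 1) 1).filter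
      (fun i => PySem.Int.mod (PySem.Int.floordiv i p) 2 == 1) = fpRest data p p := by
    rw [← positions_eq data p hp]
    rfl
  simp only [hpos]
  rfl
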